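-- pv_equiv track=rewrite | github.com/alan-turing-institute/HonestCyberEval | crs/src/py/pipeline/preprocess_commits.py | check_functional_diff_in_variable_lines_order
-- ===== SOURCE A (Python) =====
-- import copy
--
-- def get_variable_snippets(full_snippet: list[str], variable_name: str) -> list[str]:
--     variable_refs = []
--     full_snippet = copy.deepcopy(full_snippet)
--
--     for line in full_snippet:
--         if variable_name in line:
--             variable_refs.append(line)
--
--     return variable_refs
--
-- def check_functional_diff_in_variable_lines_order(
--     before_code: list[str], after_code: list[str], variable_names: set[str]
-- ) -> bool:
--     for variable_name in variable_names:
--         variable_before_lines = get_variable_snippets(before_code, variable_name)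
--         variable_after_lines = get_variable_snippets(after_code, variable_name)
--
--         # logger.info(variable_before_lines)
--         # logger.info(variable_after_lines)
--         # logger.info(f'{variable_name} code is same in both? {variable_before_lines == variable_after_lines}')
--
--         if not variable_before_lines == variable_after_lines:
--             return True
--
--     return False  # I think?
-- ===== SOURCE B (Python) =====
-- def check_functional_diff_in_variable_lines_order(before_code, after_code, variable_names):
--     # Two-pointer streaming comparison: for each variable walk both code lists with
--     # two cursors, skipping lines without the variable; no intermediate lists built.
--     def skip(lines, i, name):
--         while i < len(lines) and name not in lines[i]:
--             i += 1
--         return i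
--
--     def streams_differ(name):
--         i = j = 0
--         while True:
--             i = skip(before_code, i, name)
--             j = skip(after_code, j, name)
--             if i == len(before_code) or j == len(after_code):
--                 return not (i == len(before_code) and j == len(after_code))
--             if before_code[i] != after_code[j]:
--                 return True
--             i += 1
--             j += 1
--
--     return any(streams_differ(name) for name in variable_names)
-- ===== Notes on version B (the rewrite author's own statement) =====
-- stated objective: alternative
-- what changed: Replaced A's build-both-filtered-lists-then-compare per variable by a two-pointer streaming co-traversal of before/after that skips non-matching lines and stops at the first diverging matched line, using O(1) extra space and never materializing the reference lists.
import Mathlib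
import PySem

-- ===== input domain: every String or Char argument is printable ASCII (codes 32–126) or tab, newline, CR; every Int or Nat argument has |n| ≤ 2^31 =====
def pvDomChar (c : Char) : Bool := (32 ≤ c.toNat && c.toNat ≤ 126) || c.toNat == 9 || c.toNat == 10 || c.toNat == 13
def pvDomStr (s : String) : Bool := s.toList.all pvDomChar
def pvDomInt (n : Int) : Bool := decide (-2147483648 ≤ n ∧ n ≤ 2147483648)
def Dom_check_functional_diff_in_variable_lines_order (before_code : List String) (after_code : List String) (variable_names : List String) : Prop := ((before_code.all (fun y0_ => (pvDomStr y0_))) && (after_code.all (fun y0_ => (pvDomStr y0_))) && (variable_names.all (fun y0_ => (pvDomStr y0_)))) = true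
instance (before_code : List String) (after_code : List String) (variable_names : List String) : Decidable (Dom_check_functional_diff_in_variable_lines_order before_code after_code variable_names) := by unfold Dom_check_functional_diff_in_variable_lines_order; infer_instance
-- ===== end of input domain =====

-- B replaces A's build-both-filtered-lists-then-compare per variable by a two-pointer
-- streaming co-traversal of before/after that skips non-matching lines and stops at the
-- first diverging matched line (objective: alternative; O(1) extra space, no lists built).


-- ===== PORT A =====
def get_variable_snippets (full_snippet : List String) (variable_name : String) : List String :=
  full_snippet.foldl (fun acc line => if PySem.Str.isIn variable_name line then acc ++ [line] else acc) []

def check_functional_diff_in_variable_lines_order (before_code : List String) (after_code : List String) (variable_names : List String) : Bool :=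
  match variable_names with
  | [] => false
  | variable_name :: rest =>
    if ¬ (get_variable_snippets before_code variable_name = get_variable_snippets after_code variable_name) then
      true
    else
      check_functional_diff_in_variable_lines_order before_code after_code rest

-- ===== PORT B =====
-- 'streams_differ': two cursors; the inner 'skip' while-loops are the two dropWhiles,
-- then either side exhausted (equal iff both exhausted) or compare current lines and advance.
def diffStreams (v : String) (b : List String) (a : List String) : Bool :=
  match _hb : b.dropWhile (fun l => !PySem.Str.isIn v l), _ha : a.dropWhile (fun l => !PySem.Str.isIn v l) with
  | [], [] => false
  | x :: xs, y :: ys => x ≠ y || diffStreams v xs ys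
  | _, _ => true
termination_by b.length + a.length
decreasing_by
  have h1 : (b.dropWhile (fun l => !PySem.Str.isIn v l)).length ≤ b.length := List.length_dropWhile_le _ _
  have h2 : (a.dropWhile (fun l => !PySem.Str.isIn v l)).length ≤ a.length := List.length_dropWhile_le _ _
  rw [_hb] at h1; rw [_ha] at h2; simp at h1 h2; omega

def check_functional_diff_in_variable_lines_order_alt (before_code : List String) (after_code : List String) (variable_names : List String) : Bool :=
  variable_names.any (fun v => diffStreams v before_code after_code)

-- ===== PRECONDITION & SPEC =====
def Spec_check_functional_diff_in_variable_lines_order (before_code : List String) (after_code : List String) (variable_names : List String) (out : Bool) : Prop := out = check_functional_diff_in_variable_lines_order_alt before_code after_code variable_names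
instance (before_code : List String) (after_code : List String) (variable_names : List String) (out : Bool) : Decidable (Spec_check_functional_diff_in_variable_lines_order before_code after_code variable_names out) := by unfold Spec_check_functional_diff_in_variable_lines_order; infer_instance

-- ===== CLAIM =====
def Claim_equal_check_functional_diff_in_variable_lines_order : Prop := ∀ (before_code : List String) (after_code : List String) (variable_names : List String), Dom_check_functional_diff_in_variable_lines_order before_code after_code variable_names → Spec_check_functional_diff_in_variable_lines_order before_code after_code variable_names (check_functional_diff_in_variable_lines_order before_code after_code variable_names)

-- ===== LEMMAS AND PROOFS =====

theorem snips_eq_filter (full : List String) (v : String) :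
    get_variable_snippets full v = full.filter (fun l => PySem.Str.isIn v l) := by
  unfold get_variable_snippets
  rw [PySem.List.foldl_append_if_eq_filter]
  rfl

theorem filter_via_dropWhile {α : Type} (p : α → Bool) (l : List α) :
    l.filter p = (match l.dropWhile (fun x => !p x) with
                  | [] => ([] : List α)
                  | x :: xs => x :: xs.filter p) := by
  induction l with
  | nil => simp
  | cons x xs ih =>
    by_cases h : p x = true
    · simp [h]
    · simp only [Bool.not_eq_true] at h
      simp [h, ih]

theorem diffStreams_eq (v : String) (b a : List String) :
    diffStreams v b a
      = decide (b.filter (fun l => PySem.Str.isIn v l) ≠ a.filter (fun l => PySem.Str.isIn v l)) := by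
  induction b, a using diffStreams.induct v with
  | case1 b a hb ha =>
    rw [diffStreams, filter_via_dropWhile (fun l => PySem.Str.isIn v l) b,
        filter_via_dropWhile (fun l => PySem.Str.isIn v l) a]
    rw [hb, ha]; simp
  | case2 b a x xs y ys hb ha ih =>
    rw [diffStreams, filter_via_dropWhile (fun l => PySem.Str.isIn v l) b,
        filter_via_dropWhile (fun l => PySem.Str.isIn v l) a]
    rw [hb, ha]
    split <;> simp_all
  | case3 b a h1 h2 =>
    rw [diffStreams, filter_via_dropWhile (fun l => PySem.Str.isIn v l) b,
        filter_via_dropWhile (fun l => PySem.Str.isIn v l) a]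
    match hb : List.dropWhile (fun l => !PySem.Str.isIn v l) b,
          ha : List.dropWhile (fun l => !PySem.Str.isIn v l) a with
    | [], [] => exact (h1 hb ha).elim
    | x :: xs, y :: ys => exact (h2 x xs y ys hb ha).elim
    | [], y :: ys => simp
    | x :: xs, [] => simp

theorem check_eq_alt (before_code after_code : List String) (vars : List String) :
    check_functional_diff_in_variable_lines_order before_code after_code vars
      = check_functional_diff_in_variable_lines_order_alt before_code after_code vars := by
  unfold check_functional_diff_in_variable_lines_order_alt
  induction vars with
  | nil => simp [check_functional_diff_in_variable_lines_order]
  | cons v rest ih =>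
    rw [check_functional_diff_in_variable_lines_order]
    rw [List.any_cons, diffStreams_eq, ← snips_eq_filter, ← snips_eq_filter]
    by_cases h : get_variable_snippets before_code v = get_variable_snippets after_code v
    · simp [h, ih]
    · simp [h]

-- ===== VERDICT =====
theorem check_functional_diff_in_variable_lines_order_spec : Claim_equal_check_functional_diff_in_variable_lines_order := by
  intro before_code after_code variable_names _
  exact check_eq_alt before_code after_code variable_names
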